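-- pv_equiv track=rewrite | github.com/cirosantilli/project-euler-solvers | solvers/334.py | simulate_adjacent
-- ===== SOURCE A (Python) =====
-- from collections import defaultdict, deque
--
-- def simulate_adjacent(a: int, b: int) -> int:
--     """Fast bulk stabilization simulation for test assertions (small inputs)."""
--     cfg = defaultdict(int)
--     cfg[0] = a
--     cfg[1] = b
--     q = deque([0, 1])
--     moves = 0
--     while q:
--         i = q.popleft()
--         if cfg[i] < 2:
--             continue
--         t = cfg[i] // 2
--         cfg[i] -= 2 * t
--         cfg[i - 1] += t
--         cfg[i + 1] += t
--         moves += t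
--         q.append(i - 1)
--         q.append(i)
--         q.append(i + 1)
--     return moves
-- ===== SOURCE B (Python) =====
-- def simulate_adjacent(a: int, b: int) -> int:
--     """Repeated left-to-right sweeps over the active segment instead of a worklist;
--     the total bulk-move count is order-independent (abelian sandpile)."""
--     cfg = {0: a, 1: b}
--     lo, hi = 0, 1
--     moves = 0
--     while True:
--         fired = False
--         for i in range(lo, hi + 1):
--             v = cfg.get(i, 0)
--             if v >= 2:
--                 t = v // 2
--                 cfg[i] = v - 2 * t
--                 cfg[i - 1] = cfg.get(i - 1, 0) + t
--                 cfg[i + 1] = cfg.get(i + 1, 0) + t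
--                 moves += t
--                 lo = min(lo, i - 1)
--                 hi = max(hi, i + 1)
--                 fired = True
--         if not fired:
--             return moves
-- ===== Notes on version B (the rewrite author's own statement) =====
-- stated objective: alternative
-- what changed: B replaces A's deque-driven worklist (pop a site, bulk-fire it, re-enqueue its neighbourhood) by repeated left-to-right sweeps over the tracked active segment [lo,hi], relying on the abelian property that the total bulk-move count is independent of firing order (proved in Lean via a least-action argument).
import Mathlib
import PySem

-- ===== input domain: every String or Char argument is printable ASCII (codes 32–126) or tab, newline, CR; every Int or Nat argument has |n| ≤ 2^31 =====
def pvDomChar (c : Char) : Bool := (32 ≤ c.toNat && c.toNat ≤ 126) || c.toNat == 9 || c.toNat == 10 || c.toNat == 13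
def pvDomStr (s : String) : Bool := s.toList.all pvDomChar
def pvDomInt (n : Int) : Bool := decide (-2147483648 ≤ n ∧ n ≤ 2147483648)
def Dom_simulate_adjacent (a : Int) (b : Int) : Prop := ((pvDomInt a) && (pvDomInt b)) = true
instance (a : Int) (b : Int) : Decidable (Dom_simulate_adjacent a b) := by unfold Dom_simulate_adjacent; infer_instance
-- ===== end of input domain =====

-- B replaces A's worklist-queue stabilization by repeated left-to-right sweeps over the active
-- segment (alternative algorithm, same exact move count, proved via order-independence).

-- ===== PORT A =====
-- Fuel values are totality guards only; they are proved sufficient below (the 0-fuel arms are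
-- proved unreachable), so both ports compute exactly what their Python computes on every input.
def pvT (k : Int) : Int := if 0 ≤ k then k * (k + 1) / 2 else 0
def pvR (a : Int) (b : Int) : Int := max (max a b) 1
def pvB (a : Int) (b : Int) : Int := (2 * pvR a b + 2) * pvT (pvR a b)

def aLoop : Nat → PySem.Dict Int Int → List Int → Int → Int
  | _, _, [], moves => moves
  | 0, _, _, moves => moves          -- fuel guard, never reached
  | fuel + 1, cfg, i :: q, moves =>
    let v := cfg.getD i 0            -- defaultdict(int) read
    if v < 2 then aLoop fuel cfg q moves
    else
      let t := PySem.Int.floordiv v 2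
      let cfg1 := cfg.insert i (v - 2 * t)
      let cfg2 := cfg1.insert (i - 1) (cfg1.getD (i - 1) 0 + t)
      let cfg3 := cfg2.insert (i + 1) (cfg2.getD (i + 1) 0 + t)
      aLoop fuel cfg3 (q ++ [i - 1, i, i + 1]) (moves + t)

def simulate_adjacent (a : Int) (b : Int) : Int :=
  aLoop (2 + 3 * pvB a b).toNat ((PySem.Dict.empty.insert 0 a).insert 1 b) [0, 1] 0

-- ===== PORT B =====
structure BSt where
  cfg : PySem.Dict Int Int
  lo : Int
  hi : Int
  moves : Int
  fired : Bool

def bStep (st : BSt) (i : Int) : BSt :=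
  let v := st.cfg.getD i 0
  if 2 ≤ v then
    let t := PySem.Int.floordiv v 2
    let cfg1 := st.cfg.insert i (v - 2 * t)
    let cfg2 := cfg1.insert (i - 1) (cfg1.getD (i - 1) 0 + t)
    let cfg3 := cfg2.insert (i + 1) (cfg2.getD (i + 1) 0 + t)
    ⟨cfg3, min st.lo (i - 1), max st.hi (i + 1), st.moves + t, true⟩
  else st

def bLoop : Nat → PySem.Dict Int Int → Int → Int → Int → Int
  | 0, _, _, _, moves => moves       -- fuel guard, never reached
  | fuel + 1, cfg, lo, hi, moves =>
    let res := (PySem.List.pyRange lo (hi + 1) 1).foldl bStep ⟨cfg, lo, hi, moves, false⟩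
    if res.fired then bLoop fuel res.cfg res.lo res.hi res.moves else res.moves

def simulate_adjacent_alt (a : Int) (b : Int) : Int :=
  bLoop (pvB a b + 2).toNat ((PySem.Dict.empty.insert 0 a).insert 1 b) 0 1 0

-- ===== PRECONDITION & SPEC =====
def Spec_simulate_adjacent (a : Int) (b : Int) (out : Int) : Prop := out = simulate_adjacent_alt a b
instance (a : Int) (b : Int) (out : Int) : Decidable (Spec_simulate_adjacent a b out) := by unfold Spec_simulate_adjacent; infer_instance

-- ===== CLAIM (what is proved, stated in full; the proofs are below) =====
def Claim_equal_simulate_adjacent : Prop := ∀ (a : Int) (b : Int), Dom_simulate_adjacent a b → Spec_simulate_adjacent a b (simulate_adjacent a b)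

-- ===== LEMMAS AND PROOFS =====

-- abstract sandpile runs (unit topplings), used only by the proofs
def pvRep (d : PySem.Dict Int Int) : Int → Int := fun j => d.getD j 0
def pvC0 (a : Int) (b : Int) : Int → Int := fun j => if j = 0 then a else if j = 1 then b else 0
def pvFire (c : Int → Int) (i : Int) : Int → Int :=
  fun j => if j = i then c j - 2 else if j = i - 1 then c j + 1 else if j = i + 1 then c j + 1 else c j

inductive pvRun : (Int → Int) → List Int → (Int → Int) → Prop
  | nil (c : Int → Int) : pvRun c [] c
  | cons {c : Int → Int} {i : Int} {l : List Int} {c' : Int → Int}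
      (h : 2 ≤ c i) (hr : pvRun (pvFire c i) l c') : pvRun c (i :: l) c'

def pvCounts (l : List Int) (j : Int) : Int := (l.count j : Int)
def pvApply (c : Int → Int) (v : Int → Int) : Int → Int :=
  fun j => c j + v (j - 1) + v (j + 1) - 2 * v j
def pvStable (c : Int → Int) : Prop := ∀ j, c j < 2
def pvD (j : Int) : Int := if 1 ≤ j then j - 1 else -j
def pvW (a : Int) (b : Int) : Int → Int := fun j => pvT (pvR a b - pvD j)

lemma pvT_nonneg (k : Int) : 0 ≤ pvT k := by
  unfold pvT; split_ifs with h
  · exact Int.ediv_nonneg (by nlinarith) (by norm_num)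
  · rfl

lemma pvT_two (k : Int) (h : 0 ≤ k) : 2 * pvT k = k * (k + 1) := by
  unfold pvT; rw [if_pos h]
  rw [Int.mul_ediv_cancel' (Int.even_mul_succ_self k).two_dvd]

lemma pvT_nonpos (k : Int) (h : k ≤ 0) : pvT k = 0 := by
  unfold pvT; split_ifs with h'
  · have : k = 0 := le_antisymm h h'
    subst this; rfl
  · rfl

lemma pvT_mono {k m : Int} (h : k ≤ m) : pvT k ≤ pvT m := by
  by_cases hk : 0 ≤ k
  · have h1 := pvT_two k hk
    have h2 := pvT_two m (le_trans hk h)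
    nlinarith
  · rw [pvT_nonpos k (by omega)]; exact pvT_nonneg m

lemma pvT_lap (k : Int) : pvT (k + 1) + pvT (k - 1) - 2 * pvT k ≤ 1 := by
  by_cases hk : 1 ≤ k
  · have h1 := pvT_two (k + 1) (by omega)
    have h2 := pvT_two (k - 1) (by omega)
    have h3 := pvT_two k (by omega)
    nlinarith
  · by_cases hk0 : k = 0
    · subst hk0
      norm_num [pvT]
    · rw [pvT_nonpos (k - 1) (by omega), pvT_nonpos k (by omega),
        pvT_nonpos (k + 1) (by omega)]
      norm_num

lemma pvR_pos (a b : Int) : 1 ≤ pvR a b := le_max_right _ _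

lemma pvB_nonneg (a b : Int) : 0 ≤ pvB a b := by
  have h := pvR_pos a b
  have := pvT_nonneg (pvR a b)
  unfold pvB; nlinarith

-- counts of lists
lemma pvCounts_cons (i : Int) (l : List Int) (j : Int) :
    pvCounts (i :: l) j = pvCounts l j + (if j = i then 1 else 0) := by
  unfold pvCounts
  rw [List.count_cons]
  simp only [beq_iff_eq]
  push_cast
  split_ifs <;> omega

lemma pvCounts_nonneg (l : List Int) (j : Int) : 0 ≤ pvCounts l j := Int.natCast_nonneg _

-- run structure
lemma pvRun_append {c c' c'' : Int → Int} {l1 l2 : List Int}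
    (h1 : pvRun c l1 c') (h2 : pvRun c' l2 c'') : pvRun c (l1 ++ l2) c'' := by
  induction h1 with
  | nil => simpa using h2
  | cons h hr ih => exact pvRun.cons h (ih h2)

lemma pvRun_apply {c c' : Int → Int} {l : List Int} (h : pvRun c l c') :
    ∀ j, c' j = pvApply c (pvCounts l) j := by
  induction h with
  | nil =>
    intro j; simp [pvApply, pvCounts]
  | @cons c i l c' h hr ih =>
    intro j
    rw [ih j]
    simp only [pvApply, pvFire, pvCounts_cons]
    split_ifs <;> omega

lemma pvFire_apply (c v : Int → Int) (i : Int) :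
    pvFire (pvApply c v) i = pvApply c (fun j => if j = i then v j + 1 else v j) := by
  funext j
  simp only [pvFire, pvApply]
  split_ifs <;> omega

-- least action principle
lemma pvLap_aux (c w : Int → Int) (hw : ∀ j, pvApply c w j < 2) :
    ∀ (l : List Int) (v : Int → Int) (c' : Int → Int), (∀ j, v j ≤ w j) →
      pvRun (pvApply c v) l c' → ∀ j, v j + pvCounts l j ≤ w j := by
  intro l
  induction l with
  | nil =>
    intro v c' hvw hr j
    simp [pvCounts]
    exact hvw j
  | cons i l ih =>
    intro v c' hvw hr j
    cases hr with
    | cons h2 hr' =>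
      have hlt : v i < w i := by
        by_contra hcon
        have hvi : v i = w i := le_antisymm (hvw i) (by omega)
        have : pvApply c v i < 2 := by
          have hc := hw i
          have h1 := hvw (i - 1)
          have h2 := hvw (i + 1)
          simp only [pvApply] at hc ⊢
          omega
        omega
      rw [pvFire_apply] at hr'
      have hvw' : ∀ j, (fun j => if j = i then v j + 1 else v j) j ≤ w j := by
        intro j; by_cases h : j = i <;> simp [h] <;> [omega; exact hvw j]
      have := ih _ _ hvw' hr' j
      rw [pvCounts_cons]
      by_cases hji : j = i <;> simp [hji] at this ⊢ <;> omega

lemma pvLap {c c' w : Int → Int} {l : List Int} (hw0 : ∀ j, 0 ≤ w j)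
    (hw : ∀ j, pvApply c w j < 2) (hr : pvRun c l c') : ∀ j, pvCounts l j ≤ w j := by
  have hc : pvApply c (fun _ => 0) = c := by funext j; simp [pvApply]
  have h := pvLap_aux c w hw l (fun _ => 0) c' (fun j => hw0 j) (by rwa [hc])
  intro j; have hj := h j; simpa using hj

-- uniqueness of the total move count
lemma pvRun_len_unique {c c1 c2 : Int → Int} {l1 l2 : List Int}
    (h1 : pvRun c l1 c1) (hs1 : pvStable c1) (h2 : pvRun c l2 c2) (hs2 : pvStable c2) :
    l1.length = l2.length := by
  have hle : ∀ {la lb : List Int} {ca cb : Int → Int}, pvRun c la ca → pvRun c lb cb →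
      pvStable cb → ∀ j, pvCounts la j ≤ pvCounts lb j := by
    intro la lb ca cb ha hb hsb
    refine pvLap (fun j => pvCounts_nonneg lb j) ?_ ha
    intro j
    have := pvRun_apply hb j
    rw [← this]; exact hsb j
  have hcnt : ∀ j, l1.count j = l2.count j := by
    intro j
    have a1 := hle h1 h2 hs2 j
    have a2 := hle h2 h1 hs1 j
    unfold pvCounts at a1 a2
    omega
  exact (List.perm_iff_count.mpr hcnt).length_eq

-- bulk firing
lemma pvRun_bulk : ∀ (t : Nat) (c : Int → Int) (i : Int), 2 * (t : Int) ≤ c i →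
    pvRun c (List.replicate t i)
      (fun j => if j = i then c j - 2 * t else if j = i - 1 then c j + t
                else if j = i + 1 then c j + t else c j) := by
  intro t
  induction t with
  | zero =>
    intro c i _
    have : (fun j => if j = i then c j - 2 * ((0 : Nat) : Int) else if j = i - 1 then c j + ((0 : Nat) : Int)
        else if j = i + 1 then c j + ((0 : Nat) : Int) else c j) = c := by
      funext j; split_ifs <;> simp
    rw [this]; exact pvRun.nil c
  | succ t ih =>
    intro c i h
    have h2 : 2 ≤ c i := by push_cast at h; omega
    refine pvRun.cons h2 ?_
    have hih := ih (pvFire c i) i (by simp [pvFire]; push_cast at h ⊢; omega)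
    have heq : (fun j => if j = i then pvFire c i j - 2 * (t : Int) else if j = i - 1 then pvFire c i j + (t : Int)
        else if j = i + 1 then pvFire c i j + (t : Int) else pvFire c i j)
        = (fun j => if j = i then c j - 2 * ((t + 1 : Nat) : Int) else if j = i - 1 then c j + ((t + 1 : Nat) : Int)
        else if j = i + 1 then c j + ((t + 1 : Nat) : Int) else c j) := by
      funext j; simp only [pvFire]; push_cast; split_ifs <;> omega
    rw [heq] at hih
    exact hih

-- the explicit stabilizing weight
lemma pvW_nonneg (a b : Int) (j : Int) : 0 ≤ pvW a b j := pvT_nonneg _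

lemma pvW_le (a b : Int) (j : Int) : pvW a b j ≤ pvT (pvR a b) := by
  unfold pvW; exact pvT_mono (by unfold pvD; split_ifs <;> omega)

lemma pvW_support (a b : Int) (j : Int) (h : 1 ≤ pvW a b j) : 1 - pvR a b ≤ j ∧ j ≤ pvR a b := by
  by_contra hcon
  have hd : pvR a b - pvD j ≤ 0 := by
    have h1 := pvR_pos a b
    unfold pvD; split_ifs <;> omega
  have := pvT_nonpos _ hd
  unfold pvW at h; omega

lemma pvW_stab (a b : Int) : ∀ j, pvApply (pvC0 a b) (pvW a b) j < 2 := by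
  intro j
  have hR := pvR_pos a b
  have hRa : a ≤ pvR a b := le_trans (le_max_left a b) (le_max_left _ _)
  have hRb : b ≤ pvR a b := le_trans (le_max_right a b) (le_max_left _ _)
  set R := pvR a b with hRdef
  have h1 : 2 * pvT R = R * R + R := by rw [pvT_two R (by omega)]; ring
  have h2 : 2 * pvT (R - 1) = R * R - R := by rw [pvT_two (R - 1) (by omega)]; ring
  by_cases hj0 : j = 0
  · subst hj0
    have e1 : pvD (0 - 1) = 1 := by unfold pvD; norm_num
    have e2 : pvD (0 + 1) = 0 := by unfold pvD; norm_num
    have e3 : pvD 0 = 0 := by unfold pvD; norm_num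
    simp only [pvApply, pvC0, pvW, e1, e2, e3]
    norm_num
    linarith
  · by_cases hj1 : j = 1
    · subst hj1
      have e1 : pvD (1 - 1) = 0 := by unfold pvD; norm_num
      have e2 : pvD (1 + 1) = 1 := by unfold pvD; norm_num
      have e3 : pvD 1 = 0 := by unfold pvD; norm_num
      simp only [pvApply, pvC0, pvW, e1, e2, e3]
      norm_num
      linarith
    · by_cases hj2 : 2 ≤ j
      · have e1 : pvD j = j - 1 := by unfold pvD; rw [if_pos (by omega)]
        have e2 : pvD (j - 1) = j - 2 := by unfold pvD; rw [if_pos (by omega)]; ring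
        have e3 : pvD (j + 1) = j := by unfold pvD; rw [if_pos (by omega)]; ring
        have hl := pvT_lap (R - j + 1)
        simp only [pvApply, pvC0, pvW, e1, e2, e3]
        rw [if_neg (by omega), if_neg (by omega)]
        rw [← hRdef]
        ring_nf at hl ⊢
        linarith
      · have hjn : j ≤ -1 := by omega
        have e1 : pvD j = -j := by unfold pvD; rw [if_neg (by omega)]
        have e2 : pvD (j - 1) = 1 - j := by unfold pvD; rw [if_neg (by omega)]; ring
        have e3 : pvD (j + 1) = -(j + 1) := by unfold pvD; rw [if_neg (by omega)]
        have hl := pvT_lap (R + j)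
        simp only [pvApply, pvC0, pvW, e1, e2, e3]
        rw [if_neg (by omega), if_neg (by omega)]
        rw [← hRdef]
        ring_nf at hl ⊢
        linarith

-- any legal run from the initial configuration has at most pvB a b unit moves
lemma pvRun_len_le {a b : Int} {l : List Int} {c' : Int → Int}
    (h : pvRun (pvC0 a b) l c') : (l.length : Int) ≤ pvB a b := by
  have hcw := pvLap (pvW_nonneg a b) (pvW_stab a b) h
  have hsub : l.toFinset ⊆ Finset.Icc (1 - pvR a b) (pvR a b) := by
    intro j hj
    rw [List.mem_toFinset] at hj
    have h1 : 1 ≤ pvCounts l j := by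
      unfold pvCounts
      exact_mod_cast List.count_pos_iff.mpr hj
    have := pvW_support a b j (le_trans h1 (hcw j))
    rw [Finset.mem_Icc]; omega
  have hlen : (l.length : Int) = ∑ j ∈ l.toFinset, pvCounts l j := by
    unfold pvCounts
    rw [← Nat.cast_sum]
    exact_mod_cast (List.sum_toFinset_count_eq_length l).symm
  rw [hlen]
  have hstep1 : ∑ j ∈ l.toFinset, pvCounts l j ≤ ∑ j ∈ l.toFinset, pvW a b j :=
    Finset.sum_le_sum (fun j _ => hcw j)
  have hstep2 : ∑ j ∈ l.toFinset, pvW a b j ≤ ∑ j ∈ Finset.Icc (1 - pvR a b) (pvR a b), pvW a b j :=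
    Finset.sum_le_sum_of_subset_of_nonneg hsub (fun j _ _ => pvW_nonneg a b j)
  have hcard : ((Finset.Icc (1 - pvR a b) (pvR a b)).card : Int) = 2 * pvR a b := by
    rw [Int.card_Icc]
    have hR := pvR_pos a b
    rw [Int.toNat_of_nonneg (by omega)]
    ring
  have hstep3 : ∑ j ∈ Finset.Icc (1 - pvR a b) (pvR a b), pvW a b j
      ≤ 2 * pvR a b * pvT (pvR a b) := by
    calc ∑ j ∈ Finset.Icc (1 - pvR a b) (pvR a b), pvW a b j
        ≤ (Finset.Icc (1 - pvR a b) (pvR a b)).card • pvT (pvR a b) :=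
          Finset.sum_le_card_nsmul _ _ _ (fun j _ => pvW_le a b j)
      _ = ((Finset.Icc (1 - pvR a b) (pvR a b)).card : Int) * pvT (pvR a b) := by
          rw [nsmul_eq_mul]
      _ = 2 * pvR a b * pvT (pvR a b) := by rw [hcard]
  have hB : 2 * pvR a b * pvT (pvR a b) ≤ pvB a b := by
    unfold pvB
    have := pvT_nonneg (pvR a b)
    nlinarith
  omega

-- the initial dictionary represents pvC0
lemma pvRep_init (a b : Int) : pvRep ((PySem.Dict.empty.insert 0 a).insert 1 b) = pvC0 a b := by
  funext j
  simp only [pvRep, pvC0, PySem.Dict.getD_insert, PySem.Dict.getD_empty]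
  split_ifs <;> first | rfl | omega

-- one bulk firing step of either port, at dictionary level
lemma pvRep_update (cfg : PySem.Dict Int Int) (i t : Int) :
    pvRep (((cfg.insert i (cfg.getD i 0 - 2 * t)).insert (i - 1)
        ((cfg.insert i (cfg.getD i 0 - 2 * t)).getD (i - 1) 0 + t)).insert (i + 1)
        (((cfg.insert i (cfg.getD i 0 - 2 * t)).insert (i - 1)
        ((cfg.insert i (cfg.getD i 0 - 2 * t)).getD (i - 1) 0 + t)).getD (i + 1) 0 + t))
      = fun j => if j = i then pvRep cfg j - 2 * t else if j = i - 1 then pvRep cfg j + t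
                 else if j = i + 1 then pvRep cfg j + t else pvRep cfg j := by
  funext j
  simp only [pvRep, PySem.Dict.getD_insert]
  split_ifs <;> subst_vars <;> omega

lemma pvRep_update' (cfg : PySem.Dict Int Int) (i t j : Int) :
    pvRep (((cfg.insert i (cfg.getD i 0 - 2 * t)).insert (i - 1)
        ((cfg.insert i (cfg.getD i 0 - 2 * t)).getD (i - 1) 0 + t)).insert (i + 1)
        (((cfg.insert i (cfg.getD i 0 - 2 * t)).insert (i - 1)
        ((cfg.insert i (cfg.getD i 0 - 2 * t)).getD (i - 1) 0 + t)).getD (i + 1) 0 + t)) j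
      = if j = i then pvRep cfg j - 2 * t else if j = i - 1 then pvRep cfg j + t
        else if j = i + 1 then pvRep cfg j + t else pvRep cfg j := by
  have h := congrFun (pvRep_update cfg i t) j
  simpa using h

-- facts about t = v // 2
lemma pvT_div_facts (v : Int) (h : 2 ≤ v) :
    1 ≤ PySem.Int.floordiv v 2 ∧ 2 * PySem.Int.floordiv v 2 ≤ v ∧
      v - 2 * PySem.Int.floordiv v 2 < 2 := by
  have hm := PySem.Int.floordiv_mul_add_mod v 2
  have h0 := PySem.Int.mod_nonneg v (b := 2) (by norm_num)
  have h1 := PySem.Int.mod_lt v (b := 2) (by norm_num)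
  omega

-- extend a run by one bulk firing (shared by both port proofs)
lemma pvFire_ext {a b : Int} {cfg : PySem.Dict Int Int} {l : List Int} (i : Int)
    (hr : pvRun (pvC0 a b) l (pvRep cfg)) (h2 : 2 ≤ cfg.getD i 0) :
    pvRun (pvC0 a b) (l ++ List.replicate (PySem.Int.floordiv (cfg.getD i 0) 2).toNat i)
      (pvRep (((cfg.insert i (cfg.getD i 0 - 2 * PySem.Int.floordiv (cfg.getD i 0) 2)).insert (i - 1)
        ((cfg.insert i (cfg.getD i 0 - 2 * PySem.Int.floordiv (cfg.getD i 0) 2)).getD (i - 1) 0 + PySem.Int.floordiv (cfg.getD i 0) 2)).insert (i + 1)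
        (((cfg.insert i (cfg.getD i 0 - 2 * PySem.Int.floordiv (cfg.getD i 0) 2)).insert (i - 1)
        ((cfg.insert i (cfg.getD i 0 - 2 * PySem.Int.floordiv (cfg.getD i 0) 2)).getD (i - 1) 0 + PySem.Int.floordiv (cfg.getD i 0) 2)).getD (i + 1) 0 + PySem.Int.floordiv (cfg.getD i 0) 2))) := by
  obtain ⟨ht1, ht2, _⟩ := pvT_div_facts (cfg.getD i 0) h2
  have htn : (((PySem.Int.floordiv (cfg.getD i 0) 2).toNat : Int)) = PySem.Int.floordiv (cfg.getD i 0) 2 :=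
    Int.toNat_of_nonneg (by omega)
  have h2t : 2 * (((PySem.Int.floordiv (cfg.getD i 0) 2).toNat : Int)) ≤ pvRep cfg i := by
    rw [htn]; exact ht2
  have hbulk := pvRun_bulk (PySem.Int.floordiv (cfg.getD i 0) 2).toNat (pvRep cfg) i h2t
  rw [pvRep_update]
  refine pvRun_append hr ?_
  have hgoal : (fun j => if j = i then pvRep cfg j - 2 * (((PySem.Int.floordiv (cfg.getD i 0) 2).toNat : Int))
      else if j = i - 1 then pvRep cfg j + (((PySem.Int.floordiv (cfg.getD i 0) 2).toNat : Int))
      else if j = i + 1 then pvRep cfg j + (((PySem.Int.floordiv (cfg.getD i 0) 2).toNat : Int)) else pvRep cfg j)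
      = (fun j => if j = i then pvRep cfg j - 2 * PySem.Int.floordiv (cfg.getD i 0) 2
      else if j = i - 1 then pvRep cfg j + PySem.Int.floordiv (cfg.getD i 0) 2
      else if j = i + 1 then pvRep cfg j + PySem.Int.floordiv (cfg.getD i 0) 2 else pvRep cfg j) := by
    funext j; rw [htn]
  rw [hgoal] at hbulk
  exact hbulk

-- A's loop returns the length of some legal stabilizing run
lemma aLoop_spec (a b : Int) : ∀ (fuel : Nat) (cfg : PySem.Dict Int Int) (q l : List Int),
    pvRun (pvC0 a b) l (pvRep cfg) →
    (∀ j, 2 ≤ pvRep cfg j → j ∈ q) →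
    ((q.length : Int) + 3 * (pvB a b - l.length) ≤ (fuel : Int)) →
    ∃ lf cf, pvRun (pvC0 a b) lf cf ∧ pvStable cf ∧
      aLoop fuel cfg q (l.length : Int) = (lf.length : Int) := by
  intro fuel
  induction fuel with
  | zero =>
    intro cfg q l hr hcov hfuel
    cases q with
    | nil =>
      refine ⟨l, pvRep cfg, hr, ?_, rfl⟩
      intro j
      by_contra hc
      simpa using hcov j (by omega)
    | cons i q' =>
      have hlb := pvRun_len_le hr
      push_cast [List.length_cons] at hfuel
      omega
  | succ fuel ih =>
    intro cfg q l hr hcov hfuel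
    cases q with
    | nil =>
      refine ⟨l, pvRep cfg, hr, ?_, rfl⟩
      intro j
      by_contra hc
      simpa using hcov j (by omega)
    | cons i q' =>
      by_cases hv : cfg.getD i 0 < 2
      · have hstep : aLoop (fuel + 1) cfg (i :: q') (l.length : Int)
            = aLoop fuel cfg q' (l.length : Int) := by
          simp only [aLoop, if_pos hv]
        rw [hstep]
        refine ih cfg q' l hr ?_ ?_
        · intro j hj
          have hm := hcov j hj
          rcases List.mem_cons.mp hm with hji | hmq
          · exfalso
            have : pvRep cfg j = cfg.getD j 0 := rfl
            rw [hji] at hj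
            exact absurd hj (by simpa [pvRep] using hv)
          · exact hmq
        · push_cast [List.length_cons, List.length_nil] at hfuel ⊢
          omega
      · rw [not_lt] at hv
        obtain ⟨ht1, ht2, ht3⟩ := pvT_div_facts (cfg.getD i 0) hv
        have htn : (((PySem.Int.floordiv (cfg.getD i 0) 2).toNat : Int))
            = PySem.Int.floordiv (cfg.getD i 0) 2 := Int.toNat_of_nonneg (by omega)
        have hext := pvFire_ext (a := a) (b := b) i hr hv
        have hstep : aLoop (fuel + 1) cfg (i :: q') (l.length : Int)
            = aLoop fuel
              (((cfg.insert i (cfg.getD i 0 - 2 * PySem.Int.floordiv (cfg.getD i 0) 2)).insert (i - 1)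
                ((cfg.insert i (cfg.getD i 0 - 2 * PySem.Int.floordiv (cfg.getD i 0) 2)).getD (i - 1) 0 + PySem.Int.floordiv (cfg.getD i 0) 2)).insert (i + 1)
                (((cfg.insert i (cfg.getD i 0 - 2 * PySem.Int.floordiv (cfg.getD i 0) 2)).insert (i - 1)
                ((cfg.insert i (cfg.getD i 0 - 2 * PySem.Int.floordiv (cfg.getD i 0) 2)).getD (i - 1) 0 + PySem.Int.floordiv (cfg.getD i 0) 2)).getD (i + 1) 0 + PySem.Int.floordiv (cfg.getD i 0) 2))
              (q' ++ [i - 1, i, i + 1]) ((l.length : Int) + PySem.Int.floordiv (cfg.getD i 0) 2) := by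
          simp only [aLoop, if_neg (by omega : ¬ cfg.getD i 0 < 2)]
        rw [hstep]
        have hmv : (l.length : Int) + PySem.Int.floordiv (cfg.getD i 0) 2
            = ((l ++ List.replicate (PySem.Int.floordiv (cfg.getD i 0) 2).toNat i).length : Int) := by
          simp only [List.length_append, List.length_replicate]
          push_cast
          omega
        rw [hmv]
        refine ih _ _ _ hext ?_ ?_
        · intro j hj
          rw [pvRep_update'] at hj
          by_cases h1 : j = i
          · exfalso
            rw [if_pos h1, h1] at hj
            have hrv : pvRep cfg i = cfg.getD i 0 := rfl
            omega
          · by_cases h2 : j = i - 1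
            · rw [h2]; simp
            · by_cases h3 : j = i + 1
              · rw [h3]; simp
              · rw [if_neg h1, if_neg h2, if_neg h3] at hj
                have hm := hcov j hj
                rcases List.mem_cons.mp hm with hji | hmq
                · exact absurd hji h1
                · exact List.mem_append.mpr (Or.inl hmq)
        · simp only [List.length_append, List.length_replicate]
          push_cast [List.length_cons, List.length_nil] at hfuel ⊢
          omega

-- B's sweep (inner for loop) preserves the invariant
lemma bPass_spec (a b : Int) : ∀ (xs : List Int) (st : BSt) (l : List Int),
    pvRun (pvC0 a b) l (pvRep st.cfg) →
    st.moves = (l.length : Int) →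
    (∀ j, 2 ≤ pvRep st.cfg j → st.lo ≤ j ∧ j ≤ st.hi) →
    ∃ l', pvRun (pvC0 a b) l' (pvRep (xs.foldl bStep st).cfg) ∧
      (xs.foldl bStep st).moves = (l'.length : Int) ∧
      (∀ j, 2 ≤ pvRep (xs.foldl bStep st).cfg j →
        (xs.foldl bStep st).lo ≤ j ∧ j ≤ (xs.foldl bStep st).hi) ∧
      l.length ≤ l'.length ∧
      ((xs.foldl bStep st).fired = false → xs.foldl bStep st = st ∧ ∀ i ∈ xs, pvRep st.cfg i < 2) ∧
      (st.fired = false → (xs.foldl bStep st).fired = true → l.length < l'.length) := by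
  intro xs
  induction xs with
  | nil =>
    intro st l hr hmv hcov
    refine ⟨l, hr, hmv, hcov, le_refl _, ?_, ?_⟩
    · intro _
      exact ⟨rfl, by simp⟩
    · intro h1 h2
      simp only [List.foldl_nil] at h2
      rw [h1] at h2
      simp at h2
  | cons i xs ih =>
    intro st l hr hmv hcov
    by_cases hv : 2 ≤ st.cfg.getD i 0
    · obtain ⟨ht1, ht2, ht3⟩ := pvT_div_facts (st.cfg.getD i 0) hv
      have htn : (((PySem.Int.floordiv (st.cfg.getD i 0) 2).toNat : Int))
          = PySem.Int.floordiv (st.cfg.getD i 0) 2 := Int.toNat_of_nonneg (by omega)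
      have hstep : bStep st i = ⟨(((st.cfg.insert i (st.cfg.getD i 0 - 2 * PySem.Int.floordiv (st.cfg.getD i 0) 2)).insert (i - 1)
            ((st.cfg.insert i (st.cfg.getD i 0 - 2 * PySem.Int.floordiv (st.cfg.getD i 0) 2)).getD (i - 1) 0 + PySem.Int.floordiv (st.cfg.getD i 0) 2)).insert (i + 1)
            (((st.cfg.insert i (st.cfg.getD i 0 - 2 * PySem.Int.floordiv (st.cfg.getD i 0) 2)).insert (i - 1)
            ((st.cfg.insert i (st.cfg.getD i 0 - 2 * PySem.Int.floordiv (st.cfg.getD i 0) 2)).getD (i - 1) 0 + PySem.Int.floordiv (st.cfg.getD i 0) 2)).getD (i + 1) 0 + PySem.Int.floordiv (st.cfg.getD i 0) 2)),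
          min st.lo (i - 1), max st.hi (i + 1), st.moves + PySem.Int.floordiv (st.cfg.getD i 0) 2, true⟩ := by
        simp only [bStep, if_pos hv]
      have hext := pvFire_ext (a := a) (b := b) i hr hv
      have hfold : (i :: xs).foldl bStep st = xs.foldl bStep (bStep st i) := List.foldl_cons
      set l1 := l ++ List.replicate (PySem.Int.floordiv (st.cfg.getD i 0) 2).toNat i with hl1
      have hlen1 : l.length < l1.length := by
        rw [hl1]
        simp only [List.length_append, List.length_replicate]
        omega
      have hmv1 : (bStep st i).moves = (l1.length : Int) := by
        rw [hstep]
        simp only [hl1, List.length_append, List.length_replicate]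
        push_cast
        omega
      have hrun1 : pvRun (pvC0 a b) l1 (pvRep (bStep st i).cfg) := by
        rw [hstep]
        exact hext
      have hcov1 : ∀ j, 2 ≤ pvRep (bStep st i).cfg j → (bStep st i).lo ≤ j ∧ j ≤ (bStep st i).hi := by
        rw [hstep]
        intro j hj
        simp only at hj ⊢
        rw [pvRep_update'] at hj
        by_cases h1 : j = i
        · exfalso
          rw [if_pos h1, h1] at hj
          have hrv : pvRep st.cfg i = st.cfg.getD i 0 := rfl
          omega
        · by_cases h2 : j = i - 1
          · rw [h2]; omega
          · by_cases h3 : j = i + 1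
            · rw [h3]; omega
            · rw [if_neg h1, if_neg h2, if_neg h3] at hj
              have := hcov j hj
              omega
      obtain ⟨l', c1, c2, c3, c4, c5, c6⟩ := ih (bStep st i) l1 hrun1 hmv1 hcov1
      rw [hfold]
      refine ⟨l', c1, c2, c3, le_trans (le_of_lt hlen1) c4, ?_, ?_⟩
      · intro hf
        exfalso
        obtain ⟨hres, _⟩ := c5 hf
        rw [hres, hstep] at hf
        simp at hf
      · intro _ _
        exact lt_of_lt_of_le hlen1 c4
    · have hstep : bStep st i = st := by
        simp only [bStep, if_neg hv]
      have hfold : (i :: xs).foldl bStep st = xs.foldl bStep st := by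
        rw [List.foldl_cons, hstep]
      obtain ⟨l', c1, c2, c3, c4, c5, c6⟩ := ih st l hr hmv hcov
      rw [hfold]
      refine ⟨l', c1, c2, c3, c4, ?_, c6⟩
      intro hf
      obtain ⟨hres, hall⟩ := c5 hf
      refine ⟨hres, ?_⟩
      intro i' hi'
      rcases List.mem_cons.mp hi' with h | h
      · rw [h]
        have : pvRep st.cfg i = st.cfg.getD i 0 := rfl
        omega
      · exact hall i' h

-- B's outer loop returns the length of some legal stabilizing run
lemma bLoop_spec (a b : Int) : ∀ (fuel : Nat) (cfg : PySem.Dict Int Int) (lo hi : Int) (l : List Int),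
    pvRun (pvC0 a b) l (pvRep cfg) →
    (∀ j, 2 ≤ pvRep cfg j → lo ≤ j ∧ j ≤ hi) →
    (pvB a b - l.length + 1 ≤ (fuel : Int)) →
    ∃ lf cf, pvRun (pvC0 a b) lf cf ∧ pvStable cf ∧
      bLoop fuel cfg lo hi (l.length : Int) = (lf.length : Int) := by
  intro fuel
  induction fuel with
  | zero =>
    intro cfg lo hi l hr hcov hfuel
    exfalso
    have hlb := pvRun_len_le hr
    push_cast at hfuel
    omega
  | succ fuel ih =>
    intro cfg lo hi l hr hcov hfuel
    have hstep : bLoop (fuel + 1) cfg lo hi (l.length : Int)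
        = (if ((PySem.List.pyRange lo (hi + 1) 1).foldl bStep ⟨cfg, lo, hi, (l.length : Int), false⟩).fired
           then bLoop fuel ((PySem.List.pyRange lo (hi + 1) 1).foldl bStep ⟨cfg, lo, hi, (l.length : Int), false⟩).cfg
                ((PySem.List.pyRange lo (hi + 1) 1).foldl bStep ⟨cfg, lo, hi, (l.length : Int), false⟩).lo
                ((PySem.List.pyRange lo (hi + 1) 1).foldl bStep ⟨cfg, lo, hi, (l.length : Int), false⟩).hi
                ((PySem.List.pyRange lo (hi + 1) 1).foldl bStep ⟨cfg, lo, hi, (l.length : Int), false⟩).moves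
           else ((PySem.List.pyRange lo (hi + 1) 1).foldl bStep ⟨cfg, lo, hi, (l.length : Int), false⟩).moves) := by
      simp only [bLoop]
    obtain ⟨l', c1, c2, c3, c4, c5, c6⟩ :=
      bPass_spec a b (PySem.List.pyRange lo (hi + 1) 1) ⟨cfg, lo, hi, (l.length : Int), false⟩ l hr rfl hcov
    rw [hstep]
    by_cases hf : ((PySem.List.pyRange lo (hi + 1) 1).foldl bStep ⟨cfg, lo, hi, (l.length : Int), false⟩).fired
    · rw [if_pos hf]
      have hlt := c6 rfl hf
      rw [c2]
      exact ih _ _ _ l' c1 c3 (by push_cast at hfuel ⊢; omega)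
    · rw [if_neg hf]
      obtain ⟨hres, hall⟩ := c5 (Bool.not_eq_true _ ▸ (by simpa using hf))
      refine ⟨l, pvRep cfg, hr, ?_, ?_⟩
      · intro j
        by_cases hjr : lo ≤ j ∧ j ≤ hi
        · have hjm : j ∈ PySem.List.pyRange lo (hi + 1) 1 :=
            PySem.List.mem_pyRange_one.mpr ⟨hjr.1, by omega⟩
          exact hall j hjm
        · by_contra hc
          have := hcov j (by omega)
          omega
      · rw [hres]

-- ===== VERDICT (by name: the statement is the Claim_ definition above) =====
lemma pvInit_cov (a b : Int) (j : Int)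
    (hj : 2 ≤ pvRep ((PySem.Dict.empty.insert 0 a).insert 1 b) j) : 0 ≤ j ∧ j ≤ 1 := by
  rw [congrFun (pvRep_init a b) j] at hj
  unfold pvC0 at hj
  by_cases h0 : j = 0
  · omega
  · by_cases h1 : j = 1
    · omega
    · rw [if_neg h0, if_neg h1] at hj
      omega

theorem simulate_adjacent_spec : Claim_equal_simulate_adjacent := by
  unfold Claim_equal_simulate_adjacent
  intro a b _
  unfold Spec_simulate_adjacent
  have hB := pvB_nonneg a b
  have hrun0 : pvRun (pvC0 a b) [] (pvRep ((PySem.Dict.empty.insert 0 a).insert 1 b)) := by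
    rw [pvRep_init]
    exact pvRun.nil _
  obtain ⟨lf, cf, hrf, hsf, hef⟩ :=
    aLoop_spec a b (2 + 3 * pvB a b).toNat ((PySem.Dict.empty.insert 0 a).insert 1 b) [0, 1] []
      hrun0
      (by
        intro j hj
        have := pvInit_cov a b j hj
        have hj01 : j = 0 ∨ j = 1 := by omega
        rcases hj01 with h | h <;> simp [h])
      (by
        rw [Int.toNat_of_nonneg (by omega)]
        push_cast [List.length_cons, List.length_nil]
        omega)
  obtain ⟨lg, cg, hrg, hsg, heg⟩ :=
    bLoop_spec a b (pvB a b + 2).toNat ((PySem.Dict.empty.insert 0 a).insert 1 b) 0 1 []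
      hrun0
      (fun j hj => pvInit_cov a b j hj)
      (by
        rw [Int.toNat_of_nonneg (by omega)]
        push_cast [List.length_nil]
        omega)
  have hzero : ((([] : List Int).length : Nat) : Int) = 0 := by simp
  have hA : simulate_adjacent a b = (lf.length : Int) := by
    unfold simulate_adjacent
    rw [← hzero]
    exact hef
  have hBv : simulate_adjacent_alt a b = (lg.length : Int) := by
    unfold simulate_adjacent_alt
    rw [← hzero]
    exact heg
  rw [hA, hBv]
  exact_mod_cast pvRun_len_unique hrf hsf hrg hsg
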